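-- pv_equiv track=rewrite | github.com/Krasios/DiagnosticDigestBio441 | digest_model.py | processCuts
-- ===== SOURCE A (Python) =====
-- def processCuts(circular,seqLen,cuts):
--     if cuts == []:
--         return []
--     frag = []
--     for i in range(1,len(cuts),1):
--         frag.append(cuts[i]-cuts[i-1])
--     if circular:
--         frag.append(abs(seqLen-cuts[-1]+cuts[0]))
--     else:
--         frag.append(cuts[0])
--         frag.append(seqLen-cuts[-1])
--     return sorted(frag)
-- ===== SOURCE B (Python) =====
-- def _ins(acc, x):
--     # binary-search the insertion point in the sorted list acc, then insert
--     lo, hi = 0, len(acc)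
--     while lo < hi:
--         mid = (lo + hi) // 2
--         if acc[mid] <= x:
--             lo = mid + 1
--         else:
--             hi = mid
--     acc.insert(lo, x)
--
-- def processCuts(circular, seqLen, cuts):
--     if cuts == []:
--         return []
--     # single pass: thread the previous boundary and binary-insert each gap into
--     # a sorted accumulator, so no fragment list + sorted() pass.
--     acc = []
--     prev = cuts[0] if circular else 0
--     for c in (cuts[1:] if circular else cuts):
--         _ins(acc, c - prev)
--         prev = c
--     _ins(acc, abs(seqLen - prev + cuts[0]) if circular else seqLen - prev)
--     return acc
-- ===== Notes on version B (the rewrite author's own statement) =====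
-- stated objective: alternative
-- what changed: Replaces A's build-a-fragment-list-then-sorted() (indexed diff loop plus branch-specific appends) with a single pass that threads the previous boundary through the cut list and binary-inserts each gap into a sorted accumulator, never materialising the unsorted fragment list or calling sorted().
import Mathlib
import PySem

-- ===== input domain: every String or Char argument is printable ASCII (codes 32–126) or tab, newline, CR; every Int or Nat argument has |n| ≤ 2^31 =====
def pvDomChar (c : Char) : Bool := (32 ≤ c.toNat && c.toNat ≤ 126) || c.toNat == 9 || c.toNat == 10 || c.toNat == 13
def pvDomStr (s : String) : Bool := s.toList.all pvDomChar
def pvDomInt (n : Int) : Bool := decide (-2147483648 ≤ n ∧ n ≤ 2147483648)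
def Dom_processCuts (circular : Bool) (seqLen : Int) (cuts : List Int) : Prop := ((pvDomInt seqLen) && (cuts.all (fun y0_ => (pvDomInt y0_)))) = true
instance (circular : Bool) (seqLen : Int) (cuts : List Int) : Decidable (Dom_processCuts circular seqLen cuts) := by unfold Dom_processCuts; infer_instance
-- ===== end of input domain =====

-- B replaces A's fragment list + sorted() with one pass threading the previous
-- boundary and binary-inserting each gap into a sorted accumulator.

-- ===== PORT A =====
-- Literal port of A: indexed loop over range(1, len(cuts)) appending cuts[i]-cuts[i-1]
-- (indices always in range, so pyGetD's default is never used), then the branch appends.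
def processCuts (circular : Bool) (seqLen : Int) (cuts : List Int) : List Int :=
  if cuts = [] then []
  else
    let frag := (PySem.List.pyRange 1 cuts.length 1).foldl
      (fun acc i => acc ++ [PySem.List.pyGetD cuts i 0 - PySem.List.pyGetD cuts (i - 1) 0]) []
    let frag :=
      if circular then
        frag ++ [|seqLen - PySem.List.pyGetD cuts (-1) 0 + PySem.List.pyGetD cuts 0 0|]
      else
        frag ++ [PySem.List.pyGetD cuts 0 0] ++ [seqLen - PySem.List.pyGetD cuts (-1) 0]
    PySem.List.sorted frag (fun x => x) false

-- ===== PORT B =====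
-- _ins's while loop: binary search for the insertion point (the helper needs
-- pvPos_lt_of_lt for termination; indices probed are always in range, so
-- getD's default is never used)
theorem pvPos_lt_of_lt (lo hi : Nat) (h : lo < hi) :
    (lo + hi) / 2 < hi ∧ lo ≤ (lo + hi) / 2 := by omega

def pvPos (acc : List Int) (x : Int) (lo hi : Nat) : Nat :=
  if h : lo < hi then
    let mid := (lo + hi) / 2
    if acc.getD mid 0 ≤ x then pvPos acc x (mid + 1) hi else pvPos acc x lo mid
  else lo
termination_by hi - lo
decreasing_by
  · have := pvPos_lt_of_lt lo hi h; omega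
  · have := pvPos_lt_of_lt lo hi h; omega

-- acc.insert(lo, x)
def pvIns (acc : List Int) (x : Int) : List Int :=
  acc.insertIdx (pvPos acc x 0 acc.length) x

def processCuts_alt (circular : Bool) (seqLen : Int) (cuts : List Int) : List Int :=
  match cuts with
  | [] => []
  | c0 :: rest =>
    let start := if circular then c0 else 0
    let body := if circular then rest else c0 :: rest
    let st := body.foldl (fun (p : List Int × Int) c => (pvIns p.1 (c - p.2), c)) ([], start)
    let last := if circular then |seqLen - st.2 + c0| else seqLen - st.2
    pvIns st.1 last

-- ===== PRECONDITION & SPEC =====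
def Spec_processCuts (circular : Bool) (seqLen : Int) (cuts : List Int) (out : List Int) : Prop := out = processCuts_alt circular seqLen cuts
instance (circular : Bool) (seqLen : Int) (cuts : List Int) (out : List Int) : Decidable (Spec_processCuts circular seqLen cuts out) := by unfold Spec_processCuts; infer_instance

-- ===== CLAIM (what is proved, stated in full; the proofs are below) =====
def Claim_equal_processCuts : Prop := ∀ (circular : Bool) (seqLen : Int) (cuts : List Int), Dom_processCuts circular seqLen cuts → Spec_processCuts circular seqLen cuts (processCuts circular seqLen cuts)

-- ===== LEMMAS AND PROOFS =====

-- the consecutive gaps of body relative to a previous boundary p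
def pvGaps : Int → List Int → List Int
  | _, [] => []
  | p, c :: t => (c - p) :: pvGaps c t

theorem length_pvGaps (p : Int) (cs : List Int) : (pvGaps p cs).length = cs.length := by
  induction cs generalizing p with
  | nil => rfl
  | cons c t ih => simp [pvGaps, ih]

-- pvPos stays between lo and hi
theorem pvPos_bounds (acc : List Int) (x : Int) (lo hi : Nat) (h : lo ≤ hi) :
    lo ≤ pvPos acc x lo hi ∧ pvPos acc x lo hi ≤ hi := by
  unfold pvPos
  split
  · rename_i hlt
    dsimp only
    split
    · have := pvPos_bounds acc x ((lo + hi) / 2 + 1) hi (by omega)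
      omega
    · have := pvPos_bounds acc x lo ((lo + hi) / 2) (by omega)
      omega
  · omega
termination_by hi - lo
decreasing_by all_goals omega

theorem pvIns_perm (acc : List Int) (x : Int) : (pvIns acc x).Perm (x :: acc) := by
  unfold pvIns
  exact List.perm_insertIdx x acc (pvPos_bounds acc x 0 acc.length (by omega)).2

-- on a sorted list, everything left of pvPos is ≤ x and everything from pvPos on is > x
theorem pvPos_spec (acc : List Int) (x : Int) (hs : acc.Pairwise (· ≤ ·))
    (lo hi : Nat) (h1 : lo ≤ hi) (h2 : hi ≤ acc.length)
    (hlow : ∀ i, i < lo → (hi' : i < acc.length) → acc[i] ≤ x)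
    (hhigh : ∀ i, hi ≤ i → (hi' : i < acc.length) → x < acc[i]) :
    (∀ i, i < pvPos acc x lo hi → (hi' : i < acc.length) → acc[i] ≤ x) ∧
    (∀ i, pvPos acc x lo hi ≤ i → (hi' : i < acc.length) → x < acc[i]) := by
  have hs' := List.pairwise_iff_getElem.1 hs
  unfold pvPos
  split
  · rename_i hlt
    dsimp only
    have hmid : (lo + hi) / 2 < acc.length := by omega
    rw [List.getD_eq_getElem acc 0 hmid]
    split
    · rename_i hle
      refine pvPos_spec acc x hs ((lo + hi) / 2 + 1) hi (by omega) h2 ?_ hhigh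
      intro i hi1 hi2
      rcases Nat.lt_or_ge i ((lo + hi) / 2) with hcase | hcase
      · exact le_trans (hs' i ((lo + hi) / 2) hi2 hmid hcase) hle
      · have : i = (lo + hi) / 2 := by omega
        subst this; exact hle
    · rename_i hgt
      refine pvPos_spec acc x hs lo ((lo + hi) / 2) (by omega) (by omega) hlow ?_
      intro i hi1 hi2
      rcases Nat.lt_or_ge ((lo + hi) / 2) i with hcase | hcase
      · exact lt_of_lt_of_le (lt_of_not_ge hgt) (hs' ((lo + hi) / 2) i hmid hi2 hcase)
      · have : i = (lo + hi) / 2 := by omega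
        subst this; exact lt_of_not_ge hgt
  · rename_i hge
    have : lo = hi := by omega
    subst this
    exact ⟨hlow, hhigh⟩
termination_by hi - lo
decreasing_by all_goals omega

theorem pvIns_pairwise (acc : List Int) (x : Int) (h : acc.Pairwise (· ≤ ·)) :
    (pvIns acc x).Pairwise (· ≤ ·) := by
  obtain ⟨hleft, hright⟩ := pvPos_spec acc x h 0 acc.length (by omega) (le_refl _)
    (by omega) (by intro i hi hlen; omega)
  have hple : pvPos acc x 0 acc.length ≤ acc.length :=
    (pvPos_bounds acc x 0 acc.length (by omega)).2
  have h' := List.pairwise_iff_getElem.1 h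
  set p := pvPos acc x 0 acc.length with hp
  unfold pvIns
  rw [← hp, List.pairwise_iff_getElem]
  intro i j hi hj hij
  have hlen : (acc.insertIdx p x).length = acc.length + 1 := by
    rw [List.length_insertIdx]; simp [hple]
  rw [List.getElem_insertIdx, List.getElem_insertIdx]
  split_ifs <;>
    first
      | omega
      | exact h' _ _ (by omega) (by omega) (by omega)
      | exact hleft _ (by omega) (by omega)
      | exact le_of_lt (hright _ (by omega) (by omega))

-- the fold's accumulator is a permutation of acc0 ++ the gaps
theorem fold_acc_perm (body : List Int) (acc0 : List Int) (p0 : Int) :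
    ((body.foldl (fun (p : List Int × Int) c => (pvIns p.1 (c - p.2), c)) (acc0, p0)).1).Perm
      (acc0 ++ pvGaps p0 body) := by
  induction body generalizing acc0 p0 with
  | nil => simp [pvGaps]
  | cons c t ih =>
    simp only [List.foldl_cons, pvGaps]
    refine (ih _ _).trans ?_
    exact (((pvIns_perm acc0 (c - p0)).append_right _).trans List.perm_middle.symm)

-- and it stays sorted
theorem fold_acc_pairwise (body : List Int) (acc0 : List Int) (p0 : Int)
    (h : acc0.Pairwise (· ≤ ·)) :
    ((body.foldl (fun (p : List Int × Int) c => (pvIns p.1 (c - p.2), c)) (acc0, p0)).1).Pairwise (· ≤ ·) := by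
  induction body generalizing acc0 p0 with
  | nil => simpa
  | cons c t ih => exact ih _ _ (pvIns_pairwise _ _ h)

-- the threaded boundary ends at the last cut
theorem fold_prev (body : List Int) (acc0 : List Int) (p0 : Int) :
    ((body.foldl (fun (p : List Int × Int) c => (pvIns p.1 (c - p.2), c)) (acc0, p0)).2)
      = body.getLastD p0 := by
  induction body generalizing acc0 p0 with
  | nil => rfl
  | cons c t ih => rw [List.foldl_cons, ih, List.getLastD_cons]

theorem getLastD_ne_nil (xs : List Int) (d : Int) (h : xs ≠ []) :
    xs.getLastD d = xs.getLast h := by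
  cases xs with
  | nil => exact absurd rfl h
  | cons a t =>
    rw [List.getLastD_eq_getLast?, List.getLast?_eq_some_getLast (h := h)]
    rfl

-- indexing pvGaps: the k-th gap is cuts[k+1] - cuts[k]
theorem pvGaps_getElem (c0 : Int) (cs : List Int) (k : Nat) (hk : k < cs.length)
    (hk2 : k < (pvGaps c0 cs).length) :
    (pvGaps c0 cs)[k] = (c0 :: cs)[k + 1]'(by simpa using Nat.succ_lt_succ hk)
      - (c0 :: cs)[k]'(Nat.lt_succ_of_lt hk) := by
  induction cs generalizing c0 k with
  | nil => simp at hk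
  | cons b t ih =>
    cases k with
    | zero => simp [pvGaps]
    | succ j =>
      simp only [pvGaps]
      have := ih b j (by simpa using hk) (by simpa [pvGaps] using hk2)
      simpa using this

-- A's loop computes exactly the consecutive gaps of the cut list
theorem loop_eq_gaps (c0 : Int) (cs : List Int) :
    (PySem.List.pyRange 1 (c0 :: cs).length 1).foldl
      (fun acc i => acc ++ [PySem.List.pyGetD (c0 :: cs) i 0 - PySem.List.pyGetD (c0 :: cs) (i - 1) 0]) []
      = pvGaps c0 cs := by
  rw [PySem.List.foldl_append_singleton_eq_map, List.nil_append]
  apply List.ext_getElem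
  · simp [PySem.List.length_pyRange_one, length_pvGaps]
  · intro k h1 h2
    have hk : k < cs.length := by
      have := h1
      simp only [List.length_map, PySem.List.length_pyRange_one, List.length_cons] at this
      omega
    simp only [List.getElem_map, PySem.List.getElem_pyRange_one]
    rw [pvGaps_getElem c0 cs k hk h2]
    rw [PySem.List.pyGetD_eq_getElem (c0 :: cs) 0 (by omega) (by simp; omega),
      PySem.List.pyGetD_eq_getElem (c0 :: cs) 0 (by omega) (by simp; omega)]
    have t1 : ((1 : Int) + (k : Int)).toNat = k + 1 := by omega
    have t2 : ((1 : Int) + (k : Int) - 1).toNat = k := by omega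
    simp only [t1, t2]
    rfl

-- ===== VERDICT (by name: the statement is the Claim_ definition above) =====
theorem processCuts_spec : Claim_equal_processCuts := by
  intro circular seqLen cuts _
  unfold Spec_processCuts processCuts processCuts_alt
  cases cuts with
  | nil => simp
  | cons c0 cs =>
    simp only [if_neg (List.cons_ne_nil c0 cs)]
    rw [loop_eq_gaps]
    have hne : (c0 :: cs) ≠ [] := List.cons_ne_nil c0 cs
    have hlast : PySem.List.pyGetD (c0 :: cs) (-1) 0 = (c0 :: cs).getLast hne :=
      PySem.List.pyGetD_neg_one (c0 :: cs) 0 hne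
    have hzero : PySem.List.pyGetD (c0 :: cs) 0 0 = c0 := PySem.List.pyGetD_zero_cons c0 cs 0
    cases circular with
    | true =>
      simp only [if_true]
      have hp : ((cs.foldl (fun (p : List Int × Int) c => (pvIns p.1 (c - p.2), c)) ([], c0)).2)
          = (c0 :: cs).getLast hne := by
        rw [fold_prev]
        have h0 := getLastD_ne_nil (c0 :: cs) 0 hne
        rw [List.getLastD_cons] at h0
        exact h0
      apply PySem.List.sorted_id_eq_of_perm_of_pairwise
      · refine (pvIns_perm _ _).trans ?_
        rw [hp, hlast, hzero]
        have hperm := fold_acc_perm cs [] c0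
        simp only [List.nil_append] at hperm
        exact (List.Perm.cons _ hperm).trans (List.perm_append_singleton _ _).symm
      · exact pvIns_pairwise _ _ (fold_acc_pairwise cs [] c0 (by simp))
    | false =>
      simp only [Bool.false_eq_true, if_false]
      have hp : (((c0 :: cs).foldl (fun (p : List Int × Int) c => (pvIns p.1 (c - p.2), c)) ([], 0)).2)
          = (c0 :: cs).getLast hne := by
        rw [fold_prev, getLastD_ne_nil _ _ hne]
      apply PySem.List.sorted_id_eq_of_perm_of_pairwise
      · refine (pvIns_perm _ _).trans ?_
        rw [hp, hlast, hzero]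
        have hperm := fold_acc_perm (c0 :: cs) [] 0
        simp only [List.nil_append, pvGaps, Int.sub_zero] at hperm
        refine (List.Perm.cons _ hperm).trans ?_
        -- (s-l) :: c0 :: gaps ~ (gaps ++ [c0]) ++ [s-l]
        refine ((List.perm_append_singleton _ _).symm).trans ?_
        exact List.Perm.append_right _ (List.perm_append_singleton _ _).symm
      · exact pvIns_pairwise _ _ (fold_acc_pairwise (c0 :: cs) [] 0 (by simp))
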